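-- pv_equiv track=rewrite | github.com/berquist/ctci | ctci/p68.py | s5
-- ===== SOURCE A (Python) =====
-- def s5(n):
--     count = 0
--     rd = dict()
--     for c in range(1, 1 + n):
--         for d in range(1, 1 + n):
--             result = (c ** 3) + (d ** 3)
--             if result not in rd:
--                 rd[result] = []
--             rd[result].append((c, d))
--     for (result, rl) in rd.items():
--         # for pair1 in rl:
--         #     for pair2 in rl:
--         #         count += 1
--         # for _ in rl:
--         #     count += len(rl)
--         count += len(rl) ** 2
--     return count
-- ===== SOURCE B (Python) =====
-- def s5(n):
--     # Sort-then-scan: sort all cube sums, then add (run length)**2 per maximal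
--     # run of equal values (replaces A's dict grouping).
--     vals = sorted(c ** 3 + d ** 3 for c in range(1, 1 + n) for d in range(1, 1 + n))
--     count = 0
--     i = 0
--     m = len(vals)
--     while i < m:
--         j = i + 1
--         while j < m and vals[j] == vals[i]:
--             j += 1
--         count += (j - i) ** 2
--         i = j
--     return count
-- ===== Notes on version B (the rewrite author's own statement) =====
-- stated objective: alternative
-- what changed: Replaces A's hash-dict grouping of (c,d) pairs by cube sum with sorting the flat list of cube sums and summing (run length)^2 over maximal runs of equal values in one scan.
import Mathlib
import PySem

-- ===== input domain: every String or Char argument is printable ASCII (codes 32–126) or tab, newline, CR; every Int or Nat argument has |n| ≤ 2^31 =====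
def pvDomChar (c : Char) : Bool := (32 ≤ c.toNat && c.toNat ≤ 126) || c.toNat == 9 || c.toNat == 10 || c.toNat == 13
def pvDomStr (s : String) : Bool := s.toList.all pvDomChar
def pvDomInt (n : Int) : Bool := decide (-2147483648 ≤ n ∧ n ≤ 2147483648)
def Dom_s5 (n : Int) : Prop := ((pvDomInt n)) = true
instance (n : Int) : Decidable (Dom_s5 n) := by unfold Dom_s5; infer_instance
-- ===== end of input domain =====

-- B replaces A's dict grouping of cube-sum pairs with sort-then-scan counting of maximal runs of equal values.

-- ===== PORT A =====
-- literal port of A: nested loops build a dict mapping each cube sum to the list of its (c,d) pairs, then sum len(rl)**2 over the items.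
-- Python's dict is hash-based; it is ported with Std.HashMap (so the port evaluates at Python-like cost). The only use of the
-- items() iteration order is a commutative sum, so the result does not depend on it (the proof goes through a Finset sum).
def s5 (n : Int) : Int :=
  let rd : Std.HashMap Int (List (Int × Int)) :=
    (PySem.List.pyRange 1 (1 + n) 1).foldl (fun rd c =>
      (PySem.List.pyRange 1 (1 + n) 1).foldl (fun rd d =>
        let result := c ^ 3 + d ^ 3
        let rd := if rd.contains result then rd else rd.insert result []
        -- rd[result].append((c, d)): fetch the list and store it extended
        rd.insert result (rd.getD result [] ++ [(c, d)])) rd) ∅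
  rd.toList.foldl (fun count p => count + (PySem.List.len p.2) ^ 2) 0

-- ===== PORT B =====
-- B's scan: 'j = i+1; while vals[j] == vals[i]: j += 1' counts the run at i (j - i = 1 + length of the takeWhile(== vals[i])
-- of the remainder); the outer index loop is this tail recursion over the sorted list, accumulating count as the Python does.
def s5AltScan (count : Int) (l : List Int) : Int :=
  match l with
  | [] => count
  | x :: xs =>
    s5AltScan (count + (1 + ((xs.takeWhile (· == x)).length : Int)) ^ 2) (xs.dropWhile (· == x))
  termination_by l.length
  decreasing_by
    simp only [List.length_cons]
    exact Nat.lt_succ_of_le (List.length_dropWhile_le _ _)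

-- sorted(...) is Python's stable ascending sort: List.mergeSort (stable)
def s5_alt (n : Int) : Int :=
  let vals := ((PySem.List.pyRange 1 (1 + n) 1).flatMap (fun c =>
      (PySem.List.pyRange 1 (1 + n) 1).map (fun d => c ^ 3 + d ^ 3))).mergeSort
      (fun a b => decide (a ≤ b))
  s5AltScan 0 vals

-- ===== PRECONDITION & SPEC =====
def Spec_s5 (n : Int) (out : Int) : Prop := out = s5_alt n
instance (n : Int) (out : Int) : Decidable (Spec_s5 n out) := by unfold Spec_s5; infer_instance

-- ===== CLAIM (what is proved, stated in full; the proofs are below) =====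
def Claim_equal_s5 : Prop := ∀ (n : Int), Dom_s5 n → Spec_s5 n (s5 n)

-- ===== LEMMAS AND PROOFS =====

-- the flat list of (c,d) pairs A's nested loops traverse
def pvPairs (n : Int) : List (Int × Int) :=
  (PySem.List.pyRange 1 (1 + n) 1).flatMap (fun c =>
    (PySem.List.pyRange 1 (1 + n) 1).map (fun d => (c, d)))

def pvKey (p : Int × Int) : Int := p.1 ^ 3 + p.2 ^ 3

def pvStep (rd : Std.HashMap Int (List (Int × Int))) (p : Int × Int) :
    Std.HashMap Int (List (Int × Int)) :=
  let rd := if rd.contains (pvKey p) then rd else rd.insert (pvKey p) []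
  rd.insert (pvKey p) (rd.getD (pvKey p) [] ++ [p])

-- A's dict after folding l: the value list at r is the old one plus the pairs of l whose key is r
theorem pvGetD_foldl_step (l : List (Int × Int)) (m : Std.HashMap Int (List (Int × Int))) (r : Int) :
    (l.foldl pvStep m).getD r [] = m.getD r [] ++ l.filter (fun p => pvKey p == r) := by
  induction l generalizing m with
  | nil => simp
  | cons p l ih =>
    simp only [List.foldl_cons, List.filter_cons, ih]
    by_cases h : pvKey p = r
    · subst h
      rw [if_pos (by simp)]
      have hstep : (pvStep m p).getD (pvKey p) [] = m.getD (pvKey p) [] ++ [p] := by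
        simp only [pvStep]
        by_cases hc : m.contains (pvKey p)
        · simp [hc]
        · rw [Bool.not_eq_true] at hc
          simp [hc, Std.HashMap.getD_eq_fallback_of_contains_eq_false hc]
      rw [hstep, List.append_assoc]
      rfl
    · rw [if_neg (by simp [h])]
      have hstep : (pvStep m p).getD r [] = m.getD r [] := by
        have hb : (pvKey p == r) = false := by simpa using h
        simp only [pvStep]
        by_cases hc : m.contains (pvKey p)
        · simp [hc, Std.HashMap.getD_insert, hb]
        · rw [Bool.not_eq_true] at hc
          simp [hc, Std.HashMap.getD_insert, hb]
      rw [hstep]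

theorem pvContains_foldl_step (l : List (Int × Int)) (m : Std.HashMap Int (List (Int × Int))) (r : Int) :
    (l.foldl pvStep m).contains r = true ↔ r ∈ l.map pvKey ∨ m.contains r = true := by
  induction l generalizing m with
  | nil => simp
  | cons p l ih =>
    simp only [List.foldl_cons, ih, List.map_cons, List.mem_cons]
    have hstep : (pvStep m p).contains r = (pvKey p == r || m.contains r) := by
      simp only [pvStep]
      by_cases hc : m.contains (pvKey p)
      · simp [hc, Std.HashMap.contains_insert]
      · rw [Bool.not_eq_true] at hc
        simp [hc, Std.HashMap.contains_insert]
    rw [hstep]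
    simp only [Bool.or_eq_true, beq_iff_eq]
    constructor
    · rintro (h | h | h)
      exacts [Or.inl (Or.inr h), Or.inl (Or.inl h.symm), Or.inr h]
    · rintro ((h | h) | h)
      exacts [Or.inr (Or.inl h.symm), Or.inl h, Or.inr (Or.inr h)]

-- the sorted-run scan: count plus the sum of squared multiplicities over the distinct values
theorem pvScan_eq_sum (count : Int) (s : List Int) (hs : s.Pairwise (· ≤ ·)) :
    s5AltScan count s = count + ∑ r ∈ s.toFinset, ((s.count r : Int)) ^ 2 := by
  induction count, s using s5AltScan.induct with
  | case1 count => simp [s5AltScan]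
  | case2 count x xs ih =>
    set t := xs.takeWhile (· == x) with ht
    set rest := xs.dropWhile (· == x) with hrest
    have hxs : t ++ rest = xs := List.takeWhile_append_dropWhile
    have htall : ∀ y ∈ t, y = x := by
      intro y hy
      have := List.mem_takeWhile_imp (ht ▸ hy)
      simpa using this
    have hxle : ∀ y ∈ xs, x ≤ y := by
      intro y hy
      exact (List.pairwise_cons.mp hs).1 y hy
    have hrest_sub : rest.Sublist xs := hrest ▸ List.dropWhile_sublist _
    have hrest_pw : rest.Pairwise (· ≤ ·) :=
      List.Pairwise.sublist hrest_sub (List.pairwise_cons.mp hs).2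
    have hxnotin : x ∉ rest := by
      intro hmem
      cases hR : rest with
      | nil => simp [hR] at hmem
      | cons h0 rs =>
        have hh0 : (h0 == x) = false := by
          have := List.head?_dropWhile_not (· == x) xs
          rw [← hrest, hR] at this
          simpa using this
        have hh0x : h0 ≠ x := by simpa using hh0
        have hxh0 : x < h0 := by
          have : x ≤ h0 := hxle h0 (hxs ▸ (by simp [hR]))
          omega
        rw [hR] at hmem
        rcases List.mem_cons.mp hmem with h | h
        · exact hh0x h.symm
        · have : h0 ≤ x := (List.pairwise_cons.mp (hR ▸ hrest_pw)).1 x h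
          omega
    have hcount_x : (x :: xs).count x = 1 + t.length := by
      rw [List.count_cons_self, ← hxs, List.count_append]
      have h1 : t.count x = t.length := by
        rw [List.count_eq_length]
        intro y hy; exact ((htall y hy).symm : x = y) ▸ rfl
      have h2 : rest.count x = 0 := List.count_eq_zero.mpr hxnotin
      omega
    have hcount_r : ∀ r ∈ rest.toFinset, (x :: xs).count r = rest.count r := by
      intro r hr
      have hrx : r ≠ x := fun h => hxnotin (h ▸ (List.mem_toFinset.mp hr))
      have ht0 : t.count r = 0 := List.count_eq_zero.mpr (fun hmem => hrx (htall r hmem))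
      rw [List.count_cons, ← hxs, List.count_append]
      simp [ht0, Ne.symm hrx]
    have hfins : (x :: xs).toFinset = insert x rest.toFinset := by
      ext r
      simp only [List.toFinset_cons, Finset.mem_insert, List.mem_toFinset, ← hxs,
        List.mem_append]
      constructor
      · rintro (h | h | h)
        · exact Or.inl h
        · exact Or.inl (htall r h)
        · exact Or.inr h
      · rintro (h | h)
        · exact Or.inl h
        · exact Or.inr (Or.inr h)
    have hsum : ∑ r ∈ rest.toFinset, (((x :: xs).count r : Int)) ^ 2
        = ∑ r ∈ rest.toFinset, ((rest.count r : Int)) ^ 2 :=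
      Finset.sum_congr rfl (fun r hr => by rw [hcount_r r hr])
    rw [s5AltScan, ← ht, ← hrest, ih hrest_pw, hfins,
      Finset.sum_insert (by simpa using hxnotin), hcount_x, hsum]
    push_cast
    ring

-- A's result, as a Finset sum of squared multiplicities of cube sums
theorem pvA_eq_sum (n : Int) :
    s5 n = ∑ r ∈ ((pvPairs n).map pvKey).toFinset, (((pvPairs n).map pvKey).count r : Int) ^ 2 := by
  have hfold : (PySem.List.pyRange 1 (1 + n) 1).foldl (fun rd c =>
      (PySem.List.pyRange 1 (1 + n) 1).foldl (fun rd d =>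
        let result := c ^ 3 + d ^ 3
        let rd := if rd.contains result then rd else rd.insert result []
        rd.insert result (rd.getD result [] ++ [(c, d)])) rd)
        (∅ : Std.HashMap Int (List (Int × Int)))
      = (pvPairs n).foldl pvStep ∅ := by
    rw [pvPairs, List.foldl_flatMap]
    congr 1
    funext rd c
    rw [List.foldl_map]
    rfl
  simp only [s5]
  rw [hfold]
  set M := (pvPairs n).foldl pvStep ∅ with hM
  have hget : ∀ r, M.getD r [] = (pvPairs n).filter (fun p => pvKey p == r) := by
    intro r
    rw [hM, pvGetD_foldl_step]
    simp
  have hcont : ∀ r, M.contains r = true ↔ r ∈ (pvPairs n).map pvKey := by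
    intro r
    rw [hM, pvContains_foldl_step]
    simp
  set l := M.toList with hl
  have hnodup : (l.map Prod.fst).Nodup := by
    refine List.Pairwise.map Prod.fst ?_ Std.HashMap.distinct_keys_toList
    intro a b hab
    simpa using hab
  have hval : ∀ p ∈ l, p.2 = M.getD p.1 [] := by
    intro p hp
    have : M[p.1]? = some p.2 := Std.HashMap.mem_toList_iff_getElem?_eq_some.mp (by
      rw [← hl] at *; exact (Prod.mk.eta ▸ hp))
    rw [Std.HashMap.getD_eq_getD_getElem?, this]
    rfl
  rw [PySem.List.foldl_add, zero_add]
  have hmapeq : l.map (fun p => ((PySem.List.len p.2) ^ 2 : Int))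
      = (l.map Prod.fst).map (fun r => ((((pvPairs n).map pvKey).count r : Int)) ^ 2) := by
    rw [List.map_map]
    apply List.map_congr_left
    intro p hp
    have h1 : p.2 = (pvPairs n).filter (fun q => pvKey q == p.1) := by
      rw [hval p hp, hget]
    simp only [PySem.List.len_eq, Function.comp]
    rw [h1, ← List.countP_eq_length_filter, List.count, List.countP_map]
    rfl
  rw [hmapeq, ← List.sum_toFinset _ hnodup]
  have hfin : (l.map Prod.fst).toFinset = ((pvPairs n).map pvKey).toFinset := by
    ext r
    simp only [List.mem_toFinset, List.mem_map]
    constructor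
    · rintro ⟨p, hp, rfl⟩
      have : M[p.1]? = some p.2 := Std.HashMap.mem_toList_iff_getElem?_eq_some.mp (by
        rw [← hl] at *; exact (Prod.mk.eta ▸ hp))
      have hc : M.contains p.1 = true := by
        rw [Std.HashMap.contains_eq_isSome_getElem?, this]; rfl
      simpa using (hcont p.1).mp hc
    · intro hr
      have hc : M.contains r = true := (hcont r).mpr (by simpa using hr)
      rw [Std.HashMap.contains_eq_isSome_getElem?] at hc
      rcases Option.isSome_iff_exists.mp hc with ⟨v, hv⟩
      exact ⟨(r, v), Std.HashMap.mem_toList_iff_getElem?_eq_some.mpr hv, rfl⟩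
  rw [hfin]

-- ===== VERDICT (by name: the statement is the Claim_ definition above) =====
theorem s5_spec : Claim_equal_s5 := by
  intro n _
  show s5 n = s5_alt n
  rw [pvA_eq_sum]
  show _ = s5AltScan 0 _
  have hvals : ((PySem.List.pyRange 1 (1 + n) 1).flatMap (fun c =>
      (PySem.List.pyRange 1 (1 + n) 1).map (fun d => c ^ 3 + d ^ 3)))
      = (pvPairs n).map pvKey := by
    rw [pvPairs, List.map_flatMap]
    congr 1
    funext c
    rw [List.map_map]
    rfl
  rw [hvals]
  set V := (pvPairs n).map pvKey
  set s := V.mergeSort (fun a b => decide (a ≤ b)) with hsrt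
  have hperm : s.Perm V := List.mergeSort_perm V _
  have hpw : s.Pairwise (· ≤ ·) := by
    have := List.pairwise_mergeSort (le := fun a b : Int => decide (a ≤ b))
      (fun a b c hab hbc => by simp at *; omega)
      (fun a b => by simp; omega) V
    rw [← hsrt] at this
    exact this.imp (fun h => by simpa using h)
  rw [pvScan_eq_sum 0 s hpw, zero_add]
  rw [List.toFinset_eq_of_perm _ _ hperm]
  apply Finset.sum_congr rfl
  intro r _
  rw [hperm.count_eq]
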